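-- pv_equiv track=rewrite | github.com/Manggee/cdt | programmers/Lv0/홀수 vs 짝수.py | solution
-- ===== SOURCE A (Python) =====
-- def solution(num_list):
--     even = 0
--     odd = 0
--
--     for i in range(0, len(num_list)):
--         if i % 2 == 0:
--             even += num_list[i]
--         else:
--             odd += num_list[i]
--     if even > odd:
--         return even
--     else:
--         return odd
-- ===== SOURCE B (Python) =====
-- def solution(num_list):
--     # Single branch-free pass: two accumulators swapped each step,
--     # assigned to even/odd at the end according to the list length's parity.
--     x = y = 0
--     for v in num_list:
--         x, y = y + v, x
--     if len(num_list) % 2 == 0: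
--         odd, even = x, y
--     else:
--         even, odd = x, y
--     return max(odd, even)
-- ===== Notes on version B (the rewrite author's own statement) =====
-- stated objective: alternative
-- what changed: Replaces the index-based loop with an i%2 branch and per-index list indexing by a branch-free single pass over the values that swaps two accumulators each step and assigns even/odd once at the end from the length's parity.
import Mathlib
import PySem

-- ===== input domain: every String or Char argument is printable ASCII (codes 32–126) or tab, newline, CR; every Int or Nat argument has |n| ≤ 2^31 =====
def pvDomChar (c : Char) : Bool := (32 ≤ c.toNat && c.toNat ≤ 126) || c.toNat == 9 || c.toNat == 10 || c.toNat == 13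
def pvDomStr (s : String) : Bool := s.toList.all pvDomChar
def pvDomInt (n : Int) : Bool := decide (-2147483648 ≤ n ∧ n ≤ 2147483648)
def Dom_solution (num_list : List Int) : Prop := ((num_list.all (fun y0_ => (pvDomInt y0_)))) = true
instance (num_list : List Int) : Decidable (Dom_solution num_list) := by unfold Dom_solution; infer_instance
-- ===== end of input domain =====

-- B replaces A's index loop with an i % 2 branch by a branch-free swap-accumulator pass (alternative decomposition, same cost).
-- ===== PORT A =====
def solution (num_list : List Int) : Int :=
  let st := (PySem.List.pyRange 0 (PySem.List.len num_list) 1).foldl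
    (fun (p : Int × Int) i =>
      if PySem.Int.mod i 2 = 0 then (p.1 + PySem.List.pyGetD num_list i 0, p.2)
      else (p.1, p.2 + PySem.List.pyGetD num_list i 0)) (0, 0)
  if st.1 > st.2 then st.1 else st.2

-- ===== PORT B =====
def solution_alt (num_list : List Int) : Int :=
  let p := num_list.foldl (fun (q : Int × Int) v => (q.2 + v, q.1)) (0, 0)
  let oe := if num_list.length % 2 = 0 then (p.1, p.2) else (p.2, p.1)
  max oe.1 oe.2

-- ===== PRECONDITION & SPEC =====
def Spec_solution (num_list : List Int) (out : Int) : Prop := out = solution_alt num_list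
instance (num_list : List Int) (out : Int) : Decidable (Spec_solution num_list out) := by unfold Spec_solution; infer_instance

-- ===== CLAIM (what is proved, stated in full; the proofs are below) =====
def Claim_equal_solution : Prop := ∀ (num_list : List Int), Dom_solution num_list → Spec_solution num_list (solution num_list)

-- ===== LEMMAS AND PROOFS =====

-- (sum at even indices, sum at odd indices) of a list
def eoSum : List Int → Int × Int
  | [] => (0, 0)
  | v :: t => (v + (eoSum t).2, (eoSum t).1)

-- B's swap-accumulator loop computes (odd, even) or (even, odd) sums according to the length's parity.
theorem b_loop (xs : List Int) : ∀ (x y : Int),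
    xs.foldl (fun (q : Int × Int) v => (q.2 + v, q.1)) (x, y) =
      if xs.length % 2 = 0 then (x + (eoSum xs).2, y + (eoSum xs).1)
      else (y + (eoSum xs).1, x + (eoSum xs).2) := by
  induction xs with
  | nil => intro x y; simp [eoSum]
  | cons v t ih =>
    intro x y
    simp only [List.foldl_cons, ih (y + v) x, eoSum, List.length_cons]
    rcases Nat.even_or_odd t.length with h | h
    · have h2 : t.length % 2 = 0 := Nat.even_iff.mp h
      have h3 : (t.length + 1) % 2 = 1 := by omega
      simp [h2, h3, add_assoc]
    · have h2 : t.length % 2 = 1 := Nat.odd_iff.mp h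
      have h3 : (t.length + 1) % 2 = 0 := by omega
      simp [h2, h3, add_assoc]

-- A's index loop over the suffix of L starting at k accumulates the suffix's even/odd-index
-- sums, swapped when k is odd.
theorem a_loop (L : List Int) : ∀ (xs : List Int) (k : Nat) (e o : Int),
    L.drop k = xs →
    (PySem.List.pyRange (k : Int) (PySem.List.len L) 1).foldl
      (fun (p : Int × Int) i =>
        if PySem.Int.mod i 2 = 0 then (p.1 + PySem.List.pyGetD L i 0, p.2)
        else (p.1, p.2 + PySem.List.pyGetD L i 0)) (e, o) =
      if k % 2 = 0 then (e + (eoSum xs).1, o + (eoSum xs).2)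
      else (e + (eoSum xs).2, o + (eoSum xs).1) := by
  intro xs
  induction xs with
  | nil =>
    intro k e o hdrop
    have hk : L.length ≤ k := by
      by_contra h
      have := List.drop_eq_nil_iff.mp hdrop
      omega
    rw [show PySem.List.len L = (L.length : Int) from rfl,
        PySem.List.pyRange_one_eq_nil (by exact_mod_cast hk)]
    simp [eoSum]
  | cons v t ih =>
    intro k e o hdrop
    have hk : k < L.length := by
      by_contra h
      rw [List.drop_eq_nil_iff.mpr (by omega)] at hdrop
      simp at hdrop
    have h0 : L[k]? = some v := by
      have hd : (L.drop k)[0]? = L[k + 0]? := List.getElem?_drop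
      rw [hdrop] at hd
      simpa using hd.symm
    have hget : PySem.List.pyGetD L (k : Int) 0 = v := by
      rw [PySem.List.pyGetD_natCast]
      simp [List.getD_eq_getElem?_getD, h0]
    have hdrop' : L.drop (k + 1) = t := by
      rw [← List.drop_drop, hdrop]; rfl
    have hcast : ((k : Int) + 1) = ((k + 1 : Nat) : Int) := by push_cast; ring
    have hmod : PySem.Int.mod (k : Int) 2 = ((k % 2 : Nat) : Int) := PySem.Int.mod_natCast k 2
    rw [PySem.List.pyRange_one_cons (by
      rw [show PySem.List.len L = (L.length : Int) from rfl]; exact_mod_cast hk), List.foldl_cons]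
    simp only []
    rcases Nat.even_or_odd k with h | h
    · have h2 : k % 2 = 0 := Nat.even_iff.mp h
      have h3 : (k + 1) % 2 = 1 := by omega
      have hc : PySem.Int.mod (k : Int) 2 = 0 := by rw [hmod, h2]; rfl
      have hthis := ih (k + 1) (e + v) o hdrop'
      rw [h3, if_neg (by omega : ¬ (1 : Nat) = 0), ← hcast] at hthis
      rw [if_pos hc, hget, if_pos h2, hthis]
      simp [eoSum, add_assoc]
    · have h2 : k % 2 = 1 := Nat.odd_iff.mp h
      have h3 : (k + 1) % 2 = 0 := by omega
      have hc : PySem.Int.mod (k : Int) 2 = 1 := by rw [hmod, h2]; rfl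
      have hthis := ih (k + 1) e (o + v) hdrop'
      rw [h3, if_pos rfl, ← hcast] at hthis
      rw [if_neg (by rw [hc]; omega), hget, if_neg (by omega : ¬ k % 2 = 0), hthis]
      simp [eoSum, add_assoc]

-- ===== VERDICT (by name: the statement is the Claim_ definition above) =====
theorem solution_spec : Claim_equal_solution := by
  intro L _
  unfold Spec_solution solution solution_alt
  rw [b_loop L 0 0]
  have hA := a_loop L L 0 0 0 (by simp)
  rw [if_pos rfl] at hA
  simp only [Nat.cast_zero, zero_add] at hA
  simp only [hA, zero_add]
  rcases Nat.even_or_odd L.length with h | h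
  · have h2 : L.length % 2 = 0 := Nat.even_iff.mp h
    simp only [h2]
    rcases le_or_gt (eoSum L).1 (eoSum L).2 with hle | hgt
    · rw [if_neg (not_lt.mpr hle)]
      exact (max_eq_left hle).symm
    · rw [if_pos hgt]
      exact (max_eq_right hgt.le).symm
  · have h2 : L.length % 2 = 1 := Nat.odd_iff.mp h
    rw [if_neg (by omega : ¬ L.length % 2 = 0), if_neg (by omega : ¬ L.length % 2 = 0)]
    rcases le_or_gt (eoSum L).1 (eoSum L).2 with hle | hgt
    · rw [if_neg (not_lt.mpr hle)]
      exact (max_eq_left hle).symm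
    · rw [if_pos hgt]
      exact (max_eq_right hgt.le).symm
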